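-- pv_equiv track=rewrite | github.com/Mikedeejay2/CurseforgeDownloader | curseforge_downloader.py | __check_name_overlap
-- ===== SOURCE A (Python) =====
-- from typing import List, Dict, Optional, Any, Tuple
--
-- def __check_name_overlap(info: Dict[str, Any]) -> bool:
--     files_json = info['files_json']
--     files_list = info['file_names']
--
--     test_set = set()
--     for file_name in files_list:
--         if file_name in test_set:
--             return True
--         test_set.add(file_name)
--
--     return False
-- ===== SOURCE B (Python) =====
-- def __check_name_overlap(info):
--     ordered = sorted(info['file_names'])
--     for prev, cur in zip(ordered, ordered[1:]):
--         if prev == cur: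
--             return True
--     return False
-- ===== Notes on version B (the rewrite author's own statement) =====
-- stated objective: alternative
-- what changed: Replaces A's incremental hash-set membership scan with a sort-then-adjacent-scan: sort the names and report a duplicate iff two neighbouring sorted entries are equal; the unused files_json lookup is dropped.
import Mathlib
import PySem

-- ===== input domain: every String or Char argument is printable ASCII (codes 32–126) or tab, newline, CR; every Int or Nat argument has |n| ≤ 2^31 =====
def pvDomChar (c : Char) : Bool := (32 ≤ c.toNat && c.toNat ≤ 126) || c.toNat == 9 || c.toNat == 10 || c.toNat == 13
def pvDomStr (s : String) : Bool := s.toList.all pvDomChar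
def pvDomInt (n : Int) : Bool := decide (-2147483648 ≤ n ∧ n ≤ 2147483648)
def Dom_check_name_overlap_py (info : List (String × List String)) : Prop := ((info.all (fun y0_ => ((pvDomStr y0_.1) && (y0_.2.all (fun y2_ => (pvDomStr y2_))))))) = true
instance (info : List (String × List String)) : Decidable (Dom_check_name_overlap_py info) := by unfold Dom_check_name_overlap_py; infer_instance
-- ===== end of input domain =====

-- B replaces A's incremental set-membership scan by sort-then-adjacent-compare
-- (a different algorithm of similar cost); it drops the unused files_json lookup,
-- so B returns where A raises KeyError on a missing 'files_json' key (outside Pre_).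


-- ===== PORT A =====
-- Python dict lookup info[key] on the association list: first match, none = KeyError (exact).
def pvLookupA : List (String × List String) → String → Option (List String)
  | [], _ => none
  | (k, v) :: rest, key => if k == key then some v else pvLookupA rest key

-- the for-loop of A: membership test, early return True, else add and continue
def pvScan : List String → PySem.Set String → Bool
  | [], _ => false
  | x :: xs, s => if PySem.Set.contains s x then true else pvScan xs (PySem.Set.add s x)

def check_name_overlap_py (info : List (String × List String)) : Bool :=
  match pvLookupA info "files_json" with
  | none => false      -- Python raises KeyError here; excluded by Pre_
  | some _files_json =>
    match pvLookupA info "file_names" with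
    | none => false    -- Python raises KeyError here; excluded by Pre_
    | some files_list => pvScan files_list PySem.Set.empty

-- ===== PORT B =====
-- Python dict lookup info['file_names'] as a first-match search (exact; none = KeyError).
def pvLookupB (info : List (String × List String)) (key : String) : Option (List String) :=
  (info.find? (fun p => p.1 == key)).map Prod.snd

-- B's loop over zip(ordered, ordered[1:]): compare each adjacent pair, early return True.
def pvAdj : List String → Bool
  | a :: b :: t => if a == b then true else pvAdj (b :: t)
  | _ => false

def check_name_overlap_py_alt (info : List (String × List String)) : Bool :=
  match pvLookupB info "file_names" with
  | none => false      -- Python raises KeyError here; excluded by Pre_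
  | some files_list => pvAdj (PySem.List.sorted files_list (fun x => x) false)

-- ===== PRECONDITION & SPEC =====
-- Pre_ excludes exactly the inputs where A raises KeyError: a missing 'files_json' or 'file_names' key.
def Pre_check_name_overlap_py (info : List (String × List String)) : Prop :=
  "files_json" ∈ info.map Prod.fst ∧ "file_names" ∈ info.map Prod.fst
instance (info : List (String × List String)) : Decidable (Pre_check_name_overlap_py info) := by unfold Pre_check_name_overlap_py; infer_instance

def pvWitness_check_name_overlap_py : (List (String × List String)) :=
  [("files_json", ["a.jar"]), ("file_names", ["a.jar", "b.jar", "a.jar"])]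

def Spec_check_name_overlap_py (info : List (String × List String)) (out : Bool) : Prop := out = check_name_overlap_py_alt info
instance (info : List (String × List String)) (out : Bool) : Decidable (Spec_check_name_overlap_py info out) := by unfold Spec_check_name_overlap_py; infer_instance

-- ===== CLAIM (what is proved, stated in full; the proofs are below) =====
def Claim_equal_check_name_overlap_py : Prop := ∀ (info : List (String × List String)), Dom_check_name_overlap_py info → Pre_check_name_overlap_py info → Spec_check_name_overlap_py info (check_name_overlap_py info)
-- ===== LEMMAS AND PROOFS =====

theorem pvLookupA_isSome_iff (info : List (String × List String)) (key : String) :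
    (pvLookupA info key).isSome ↔ key ∈ info.map Prod.fst := by
  induction info with
  | nil => simp [pvLookupA]
  | cons p rest ih =>
    obtain ⟨k, v⟩ := p
    by_cases h : k = key
    · simp [pvLookupA, h]
    · simp [pvLookupA, h, ih, Ne.symm h]

theorem pvLookupB_eq_lookupA (info : List (String × List String)) (key : String) :
    pvLookupB info key = pvLookupA info key := by
  induction info with
  | nil => simp [pvLookupA, pvLookupB]
  | cons p rest ih =>
    obtain ⟨k, v⟩ := p
    by_cases h : k == key
    · simp [pvLookupA, pvLookupB, List.find?, eq_of_beq h]
    · simp only [pvLookupA, pvLookupB, List.find?, h]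
      exact ih

theorem pvScan_eq_false_iff (l : List String) (s : PySem.Set String) :
    pvScan l s = false ↔ (l.Nodup ∧ ∀ x ∈ l, x ∉ s) := by
  induction l generalizing s with
  | nil => simp [pvScan]
  | cons x xs ih =>
    by_cases hx : x ∈ s
    · have hc : PySem.Set.contains s x = true := (PySem.Set.contains_iff s x).2 hx
      simp only [pvScan, hc, if_true]
      constructor
      · intro h; exact absurd h (by simp)
      · rintro ⟨_, hmem⟩
        exact absurd hx (hmem x (List.mem_cons_self))
    · have hc : PySem.Set.contains s x = false := by
        cases hcv : PySem.Set.contains s x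
        · rfl
        · exact absurd ((PySem.Set.contains_iff s x).1 hcv) hx
      simp only [pvScan, hc, if_false, Bool.false_eq_true]
      rw [ih]
      constructor
      · rintro ⟨hn, hmem⟩
        refine ⟨List.Nodup.cons (fun hxxs => ?_) hn, ?_⟩
        · exact (hmem x hxxs) ((PySem.Set.mem_add s x x).2 (Or.inr rfl))
        · intro y hy
          rcases List.mem_cons.1 hy with rfl | hy'
          · exact hx
          · intro hys
            exact (hmem y hy') ((PySem.Set.mem_add s x y).2 (Or.inl hys))
      · rintro ⟨hn, hmem⟩
        have hxn : x ∉ xs := (List.nodup_cons.1 hn).1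
        refine ⟨(List.nodup_cons.1 hn).2, fun y hy hymem => ?_⟩
        rcases (PySem.Set.mem_add s x y).1 hymem with h1 | h2
        · exact hmem y (List.mem_cons_of_mem _ hy) h1
        · exact hxn (h2 ▸ hy)

theorem pvScan_empty_eq_false_iff (l : List String) :
    pvScan l PySem.Set.empty = false ↔ l.Nodup := by
  rw [pvScan_eq_false_iff]
  constructor
  · exact fun h => h.1
  · intro h
    exact ⟨h, by intro x _ hx; simp [PySem.Set.empty] at hx⟩

-- pvAdj returns false iff no two adjacent entries are equal
theorem pvAdj_eq_false_iff (l : List String) :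
    pvAdj l = false ↔ l.IsChain (fun a b => a ≠ b) := by
  induction l with
  | nil => simp [pvAdj]
  | cons a t ih =>
    cases t with
    | nil => simp [pvAdj]
    | cons b t' =>
      by_cases h : a = b
      · simp [pvAdj, h, List.isChain_cons_cons]
      · simp only [pvAdj, beq_iff_eq, if_neg h, List.isChain_cons_cons]
        rw [ih]
        tauto

-- on a ≤-sorted list, "no adjacent equal" is exactly Nodup
theorem nodup_of_pairwise_le_chain_ne (l : List String)
    (hp : l.Pairwise (fun a b => a ≤ b)) (hc : l.IsChain (fun a b => a ≠ b)) :
    l.Nodup := by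
  have hlt : l.IsChain (fun a b => a < b) := by
    induction l with
    | nil => exact List.isChain_nil
    | cons a t ih =>
      cases t with
      | nil => simp
      | cons b t' =>
        rw [List.isChain_cons_cons] at hc ⊢
        rw [List.pairwise_cons] at hp
        exact ⟨lt_of_le_of_ne (hp.1 b (List.mem_cons_self)) hc.1,
               ih hp.2 hc.2⟩
  exact (List.isChain_iff_pairwise.1 hlt).imp (fun h => ne_of_lt h)

theorem pvAdj_sorted_eq_false_iff (l : List String) :
    pvAdj (PySem.List.sorted l (fun x => x) false) = false ↔ l.Nodup := by
  rw [pvAdj_eq_false_iff]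
  constructor
  · intro hc
    have hn : (PySem.List.sorted l (fun x => x) false).Nodup :=
      nodup_of_pairwise_le_chain_ne _ (PySem.List.sorted_pairwise l (fun x => x)) hc
    exact (PySem.List.sorted_perm l (fun x => x) false).nodup_iff.1 hn
  · intro hn
    have hn' : (PySem.List.sorted l (fun x => x) false).Nodup :=
      (PySem.List.sorted_perm l (fun x => x) false).nodup_iff.2 hn
    exact List.Pairwise.isChain hn'

theorem pvScan_eq_pvAdj_sorted (l : List String) :
    pvScan l PySem.Set.empty = pvAdj (PySem.List.sorted l (fun x => x) false) := by
  by_cases h : l.Nodup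
  · rw [(pvScan_empty_eq_false_iff l).2 h, (pvAdj_sorted_eq_false_iff l).2 h]
  · have h1 : pvScan l PySem.Set.empty = true := by
      cases hv : pvScan l PySem.Set.empty
      · exact absurd ((pvScan_empty_eq_false_iff l).1 hv) h
      · rfl
    have h2 : pvAdj (PySem.List.sorted l (fun x => x) false) = true := by
      cases hv : pvAdj (PySem.List.sorted l (fun x => x) false)
      · exact absurd ((pvAdj_sorted_eq_false_iff l).1 hv) h
      · rfl
    rw [h1, h2]

-- ===== VERDICT (by name: the statements are the Claim_ definitions above) =====
theorem check_name_overlap_py_spec : Claim_equal_check_name_overlap_py := by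
  intro info _hdom hpre
  obtain ⟨h1, h2⟩ := hpre
  rw [← pvLookupA_isSome_iff] at h1 h2
  unfold Spec_check_name_overlap_py check_name_overlap_py check_name_overlap_py_alt
  obtain ⟨fj, hfj⟩ := Option.isSome_iff_exists.1 h1
  obtain ⟨fl, hfl⟩ := Option.isSome_iff_exists.1 h2
  rw [hfj, hfl, pvLookupB_eq_lookupA, hfl]
  exact pvScan_eq_pvAdj_sorted fl
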